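-- pv_equiv track=rewrite | github.com/skolakoda/ucimo-algoritme | 65-matrice/obrazac_u_matrici.py | obrazac_u_matrici
-- ===== SOURCE A (Python) =====
-- def obrazac_u_matrici(matrica, obrazac):
--     def proveri_obrazac(start_i, start_j):
--         for i in range(len(obrazac)):
--             for j in range(len(obrazac[0])):
--                 if obrazac[i][j] != matrica[i+start_i][j+start_j]:
--                     return False
--         return True
--
--     for i in range(len(matrica) - len(obrazac) + 1):
--         for j in range(len(matrica[0]) - len(obrazac[0]) + 1):
--             if proveri_obrazac(i, j):
--                 return True
--     return False
-- ===== SOURCE B (Python) =====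
-- def obrazac_u_matrici(matrica, obrazac):
--     p = len(obrazac)
--     q = len(obrazac[0])
--     pat = [red[:q] for red in obrazac]
--     cols = len(matrica[0]) if matrica else 0
--     for j in range(cols - q + 1):
--         strip = [red[j:j+q] for red in matrica]
--         for i in range(len(matrica) - p + 1):
--             if strip[i:i+p] == pat:
--                 return True
--     return False
-- ===== Notes on version B (the rewrite author's own statement) =====
-- stated objective: alternative
-- what changed: B replaces A's four nested index loops with per-cell early return by a column-offset-major search: for each column offset it slices every matrix row to a q-wide strip once and then scans for the pattern block as a contiguous sublist via whole-list slice comparisons, instead of A's per-candidate cell-by-cell helper.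
-- outside the precondition, e.g. on obrazac_u_matrici([[5, 7], [8]], [[9, 9]]): A returns False, B returns False; on obrazac_u_matrici([[1, 2], [3]], [[2], [9]]): A raises IndexError, B returns False
import Mathlib
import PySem

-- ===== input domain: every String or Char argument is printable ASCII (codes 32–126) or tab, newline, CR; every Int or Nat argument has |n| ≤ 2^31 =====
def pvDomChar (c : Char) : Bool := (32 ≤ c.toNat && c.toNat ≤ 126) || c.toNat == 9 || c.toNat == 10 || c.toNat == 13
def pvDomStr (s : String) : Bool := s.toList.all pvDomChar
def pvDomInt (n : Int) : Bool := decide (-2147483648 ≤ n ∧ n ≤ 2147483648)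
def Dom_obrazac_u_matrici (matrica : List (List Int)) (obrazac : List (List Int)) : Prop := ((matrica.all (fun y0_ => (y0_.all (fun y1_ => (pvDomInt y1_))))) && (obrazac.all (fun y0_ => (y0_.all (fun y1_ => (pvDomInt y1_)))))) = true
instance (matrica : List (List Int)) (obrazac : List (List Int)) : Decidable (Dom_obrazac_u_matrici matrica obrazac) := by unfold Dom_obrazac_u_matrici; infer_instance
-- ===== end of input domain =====

-- B searches column-offset-major with whole-slice list comparisons instead of A's per-cell nested
-- loops (an alternative algorithm of the same worst-case cost); equivalence is proved on Pre_.

-- ===== PORT A =====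
-- helper proveri_obrazac: the two cell loops with early 'return False' become List.all
def pvProveri (matrica obrazac : List (List Int)) (si sj : Int) : Bool :=
  (PySem.List.pyRange 0 (obrazac.length : Int) 1).all (fun i =>
    (PySem.List.pyRange 0 ((PySem.List.pyGetD obrazac 0 []).length : Int) 1).all (fun j =>
      PySem.List.pyGetD (PySem.List.pyGetD obrazac i []) j 0
        == PySem.List.pyGetD (PySem.List.pyGetD matrica (i + si) []) (j + sj) 0))

def obrazac_u_matrici (matrica : List (List Int)) (obrazac : List (List Int)) : Bool :=
  (PySem.List.pyRange 0 ((matrica.length : Int) - (obrazac.length : Int) + 1) 1).any (fun i =>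
    (PySem.List.pyRange 0 (((PySem.List.pyGetD matrica 0 []).length : Int) - ((PySem.List.pyGetD obrazac 0 []).length : Int) + 1) 1).any (fun j =>
      pvProveri matrica obrazac i j))

-- ===== PORT B =====
def obrazac_u_matrici_alt (matrica : List (List Int)) (obrazac : List (List Int)) : Bool :=
  let p : Int := (obrazac.length : Int)
  let q : Int := ((PySem.List.pyGetD obrazac 0 []).length : Int)
  let pat := obrazac.map (fun red => PySem.List.slice red none (some q))
  -- 'len(matrica[0]) if matrica else 0': pyGetD with default [] yields exactly length 0 on []
  let cols : Int := ((PySem.List.pyGetD matrica 0 []).length : Int)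
  (PySem.List.pyRange 0 (cols - q + 1) 1).any (fun j =>
    let strip := matrica.map (fun red => PySem.List.slice red (some j) (some (j + q)))
    (PySem.List.pyRange 0 ((matrica.length : Int) - p + 1) 1).any (fun i =>
      PySem.List.slice strip (some i) (some (i + p)) == pat))

-- ===== PRECONDITION & SPEC =====
def pvWidth (xs : List (List Int)) : Int := ((xs.getD 0 []).length : Int)

-- Pre_ excludes (a) the empty pattern, on which A raises IndexError, and (b), conservatively,
-- ragged inputs with rows shorter than the first row of their matrix, on which A may raise
-- IndexError mid-scan depending on the cell values (when A instead happens to hit a mismatch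
-- first, it returns False and B returns False too).
def Pre_obrazac_u_matrici (matrica : List (List Int)) (obrazac : List (List Int)) : Prop :=
  obrazac ≠ [] ∧
  ((matrica.length : Int) < (obrazac.length : Int)
    ∨ pvWidth matrica < pvWidth obrazac
    ∨ ((∀ red ∈ obrazac, pvWidth obrazac ≤ (red.length : Int))
        ∧ (∀ red ∈ matrica, pvWidth matrica ≤ (red.length : Int))))
instance (matrica : List (List Int)) (obrazac : List (List Int)) : Decidable (Pre_obrazac_u_matrici matrica obrazac) := by unfold Pre_obrazac_u_matrici; infer_instance

def pvWitness_obrazac_u_matrici : List (List Int) × List (List Int) := ([[1, 2], [3, 4]], [[4]])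

def Spec_obrazac_u_matrici (matrica : List (List Int)) (obrazac : List (List Int)) (out : Bool) : Prop := out = obrazac_u_matrici_alt matrica obrazac
instance (matrica : List (List Int)) (obrazac : List (List Int)) (out : Bool) : Decidable (Spec_obrazac_u_matrici matrica obrazac out) := by unfold Spec_obrazac_u_matrici; infer_instance

-- ===== CLAIM (what is proved, stated in full; the proofs are below) =====
def Claim_equal_obrazac_u_matrici : Prop := ∀ (matrica : List (List Int)) (obrazac : List (List Int)), Dom_obrazac_u_matrici matrica obrazac → Pre_obrazac_u_matrici matrica obrazac → Spec_obrazac_u_matrici matrica obrazac (obrazac_u_matrici matrica obrazac)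

-- ===== LEMMAS AND PROOFS =====

-- The mathematical content both programs decide: the pattern block (first len(obrazac[0]) columns
-- of every pattern row) matches the matrix at row offset iN, column offset jN.
def pvMatchAt (m o : List (List Int)) (iN jN : Nat) : Prop :=
  ∀ a < o.length, ∀ b < (o.getD 0 []).length,
    ((o.getD a []).getD b 0 : Int) = (m.getD (iN + a) []).getD (jN + b) 0

-- A's helper decides pvMatchAt
theorem pvProveri_iff (m o : List (List Int)) (i j : Int) (h0i : 0 ≤ i) (h0j : 0 ≤ j) :
    pvProveri m o i j = true ↔ pvMatchAt m o i.toNat j.toNat := by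
  unfold pvProveri pvMatchAt
  simp only [List.all_eq_true, PySem.List.mem_pyRange_one, beq_iff_eq,
    PySem.List.pyGetD_zero]
  constructor
  · intro h a ha b hb
    have h2 := h (a : Int) ⟨by omega, by exact_mod_cast ha⟩ (b : Int)
      ⟨by omega, by exact_mod_cast hb⟩
    rw [PySem.List.pyGetD_of_nonneg _ _ (by omega : (0:Int) ≤ (a:Int)),
        PySem.List.pyGetD_of_nonneg _ _ (by omega : (0:Int) ≤ (b:Int)),
        PySem.List.pyGetD_of_nonneg _ _ (by omega : (0:Int) ≤ (a:Int) + i),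
        PySem.List.pyGetD_of_nonneg _ _ (by omega : (0:Int) ≤ (b:Int) + j)] at h2
    convert h2 using 3 <;> omega
  · intro h x hx y hy
    rw [PySem.List.pyGetD_of_nonneg _ _ (by omega : (0:Int) ≤ x),
        PySem.List.pyGetD_of_nonneg _ _ (by omega : (0:Int) ≤ y),
        PySem.List.pyGetD_of_nonneg _ _ (by omega : (0:Int) ≤ x + i),
        PySem.List.pyGetD_of_nonneg _ _ (by omega : (0:Int) ≤ y + j)]
    have h2 := h x.toNat (by omega) y.toNat (by omega)
    convert h2 using 3 <;> omega

-- B's strip/window slice comparison decides pvMatchAt (under the Pre_ row-length bounds)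
theorem pvSlice_iff (m o : List (List Int)) (i j : Int)
    (hO : ∀ red ∈ o, (o.getD 0 []).length ≤ red.length)
    (hM : ∀ red ∈ m, (m.getD 0 []).length ≤ red.length)
    (h0i : 0 ≤ i) (hip : i.toNat + o.length ≤ m.length)
    (h0j : 0 ≤ j) (hjq : j.toNat + (o.getD 0 []).length ≤ (m.getD 0 []).length) :
    ((PySem.List.slice (m.map (fun red => PySem.List.slice red (some j) (some (j + ((o.getD 0 []).length : Int))))) (some i) (some (i + (o.length : Int))) == o.map (fun red => PySem.List.slice red none (some ((o.getD 0 []).length : Int)))) = true)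
      ↔ pvMatchAt m o i.toNat j.toNat := by
  have hf : (fun red : List Int => PySem.List.slice red (some j) (some (j + ((o.getD 0 []).length : Int))))
      = fun red => List.take (o.getD 0 []).length (List.drop j.toNat red) := by
    funext red
    rw [PySem.List.slice_toNat red h0j (by omega)]
    congr 1
    omega
  have hg : (fun red : List Int => PySem.List.slice red none (some ((o.getD 0 []).length : Int)))
      = fun red => List.take (o.getD 0 []).length red := by
    funext red
    rw [PySem.List.slice_to red (by omega)]
    simp
  rw [beq_iff_eq, PySem.List.slice_toNat _ h0i (by omega), hf, hg]
  have harith : (i + (o.length : Int)).toNat - i.toNat = o.length := by omega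
  rw [harith, ← List.map_drop, ← List.map_take]
  have hlen1 : (List.take o.length (List.drop i.toNat m)).length = o.length := by
    rw [List.length_take, List.length_drop]; omega
  unfold pvMatchAt
  constructor
  · intro h a ha b hb
    have hrow := List.getElem_of_eq h (i := a)
      (by rw [List.length_map, hlen1]; exact ha)
    simp only [List.getElem_map] at hrow
    rw [List.getElem_take, List.getElem_drop] at hrow
    have hma : i.toNat + a < m.length := by omega
    have hrlen : (m.getD 0 []).length ≤ (m[i.toNat + a]'hma).length := hM _ (List.getElem_mem _)
    have holen : (o.getD 0 []).length ≤ (o[a]'ha).length := hO _ (List.getElem_mem _)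
    have hcell := List.getElem_of_eq hrow (i := b)
      (by rw [List.length_take, List.length_drop]; omega)
    rw [List.getElem_take, List.getElem_drop, List.getElem_take] at hcell
    rw [List.getD_eq_getElem _ _ ha, List.getD_eq_getElem _ _ (by omega : b < (o[a]'ha).length),
      List.getD_eq_getElem _ _ hma,
      List.getD_eq_getElem _ _ (by omega : j.toNat + b < (m[i.toNat + a]'hma).length)]
    exact hcell.symm
  · intro h
    apply List.ext_getElem
    · simp only [List.length_map]; exact hlen1
    · intro a h1 h2
      have ha : a < o.length := by rwa [List.length_map] at h2
      simp only [List.getElem_map]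
      rw [List.getElem_take, List.getElem_drop]
      have hma : i.toNat + a < m.length := by omega
      have hrlen : (m.getD 0 []).length ≤ (m[i.toNat + a]'hma).length := hM _ (List.getElem_mem _)
      have holen : (o.getD 0 []).length ≤ (o[a]'ha).length := hO _ (List.getElem_mem _)
      apply List.ext_getElem
      · simp only [List.length_take, List.length_drop]; omega
      · intro b hb1 hb2
        rw [List.getElem_take, List.getElem_drop, List.getElem_take]
        have hb : b < (o.getD 0 []).length := by
          simp only [List.length_take, List.length_drop] at hb1; omega
        have hc := h a ha b hb
        rw [List.getD_eq_getElem _ _ ha, List.getD_eq_getElem _ _ (by omega : b < (o[a]'ha).length),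
          List.getD_eq_getElem _ _ hma,
          List.getD_eq_getElem _ _ (by omega : j.toNat + b < (m[i.toNat + a]'hma).length)] at hc
        exact hc.symm

-- ===== VERDICT (by name: the statement is the Claim_ definition above) =====
theorem obrazac_u_matrici_spec : Claim_equal_obrazac_u_matrici := by
  intro m o _ hPre
  unfold Spec_obrazac_u_matrici
  rcases hPre with ⟨ho, hcase⟩
  rw [← Bool.coe_iff_coe]
  simp only [obrazac_u_matrici, obrazac_u_matrici_alt, List.any_eq_true,
    PySem.List.mem_pyRange_one, PySem.List.pyGetD_zero]
  rcases hcase with hMp | hCq | ⟨hO', hM'⟩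
  · constructor
    · rintro ⟨i, ⟨h0i, h1i⟩, -⟩
      omega
    · rintro ⟨j, -, i, ⟨h0i, h1i⟩, -⟩
      omega
  · unfold pvWidth at hCq
    constructor
    · rintro ⟨i, -, j, ⟨h0j, h1j⟩, -⟩
      omega
    · rintro ⟨j, ⟨h0j, h1j⟩, -⟩
      omega
  · have hO : ∀ red ∈ o, (o.getD 0 []).length ≤ red.length := by
      intro red hr
      have := hO' red hr
      unfold pvWidth at this
      exact_mod_cast this
    have hM : ∀ red ∈ m, (m.getD 0 []).length ≤ red.length := by
      intro red hr
      have := hM' red hr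
      unfold pvWidth at this
      exact_mod_cast this
    constructor
    · rintro ⟨i, ⟨h0i, h1i⟩, j, ⟨h0j, h1j⟩, hp⟩
      exact ⟨j, ⟨h0j, h1j⟩, i, ⟨h0i, h1i⟩,
        (pvSlice_iff m o i j hO hM h0i (by omega) h0j (by omega)).mpr
          ((pvProveri_iff m o i j h0i h0j).mp hp)⟩
    · rintro ⟨j, ⟨h0j, h1j⟩, i, ⟨h0i, h1i⟩, hs⟩
      exact ⟨i, ⟨h0i, h1i⟩, j, ⟨h0j, h1j⟩,
        (pvProveri_iff m o i j h0i h0j).mpr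
          ((pvSlice_iff m o i j hO hM h0i (by omega) h0j (by omega)).mp hs)⟩
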